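-- pv_equiv track=rewrite | github.com/Gavinzhenxing/yixing | config.py | select_path
-- ===== SOURCE A (Python) =====
-- def select_path(path):
--     '''
--     选择所有最短路径
--     :param path: 输入路径
--     :return:
--     '''
--     cols = []
--     select_path = []
--     for i in range(len(path)):
--         cols.append(len(path[i]))
--     for i in range(len(cols)):
--         if cols[i] == min(cols):
--             select_path.append(path[i])
--     return select_path
-- ===== SOURCE B (Python) =====
-- def select_path(path):
--     '''
--     选择所有最短路径 — sort-then-prefix alternative: stable sort by length, take the leading
--     block of minimal-length paths (original order preserved by stability).
--     '''
--     if not path: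
--         return []
--     ordered = sorted(path, key=len)
--     m = len(ordered[0])
--     out = []
--     for p in ordered:
--         if len(p) != m:
--             break
--         out.append(p)
--     return out
-- ===== Notes on version B (the rewrite author's own statement) =====
-- stated objective: alternative
-- what changed: Replaces A's index-driven scan with min(cols) recomputed inside the filtering loop by a stable sort by length followed by taking the leading block of minimal-length paths.
import Mathlib
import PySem

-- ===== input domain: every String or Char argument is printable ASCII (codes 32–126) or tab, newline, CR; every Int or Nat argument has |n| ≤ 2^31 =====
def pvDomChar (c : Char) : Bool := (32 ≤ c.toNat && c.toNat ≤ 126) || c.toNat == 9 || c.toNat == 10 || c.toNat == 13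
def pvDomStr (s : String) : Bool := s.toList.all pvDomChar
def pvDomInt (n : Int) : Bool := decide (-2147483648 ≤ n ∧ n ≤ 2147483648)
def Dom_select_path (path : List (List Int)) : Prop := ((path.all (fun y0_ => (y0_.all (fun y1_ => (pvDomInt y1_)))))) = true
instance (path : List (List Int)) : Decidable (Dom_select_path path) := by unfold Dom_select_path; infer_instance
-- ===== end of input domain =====

-- B replaces A's index-driven scan (min(cols) recomputed inside the filtering loop) by a
-- stable sort by length followed by taking the leading block of minimal-length paths.

-- ===== PORT A =====
def select_path (path : List (List Int)) : List (List Int) :=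
  let cols := (PySem.List.pyRange 0 (PySem.List.len path)).foldl
    (fun acc i => acc ++ [PySem.List.len (PySem.List.pyGetD path i [])]) []
  (PySem.List.pyRange 0 (PySem.List.len cols)).foldl
    (fun acc i =>
      if PySem.List.pyGetD cols i 0 = (PySem.List.min? cols (fun x => x)).getD 0 then
        acc ++ [PySem.List.pyGetD path i []]
      else acc) []

-- ===== PORT B =====
-- the 'for p in ordered: if len(p) != m: break; out.append(p)' loop of Source B
def takeMinLen (m : Int) : List (List Int) → List (List Int)
  | [] => []
  | p :: rest => if PySem.List.len p ≠ m then [] else p :: takeMinLen m rest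

def select_path_alt (path : List (List Int)) : List (List Int) :=
  if path = [] then []
  else
    let ordered := PySem.List.sorted path (fun p => PySem.List.len p)
    let m := PySem.List.len (PySem.List.pyGetD ordered 0 [])
    takeMinLen m ordered

-- ===== PRECONDITION & SPEC =====
def Spec_select_path (path : List (List Int)) (out : List (List Int)) : Prop := out = select_path_alt path
instance (path : List (List Int)) (out : List (List Int)) : Decidable (Spec_select_path path out) := by unfold Spec_select_path; infer_instance

-- ===== CLAIM (what is proved, stated in full; the proofs are below) =====
def Claim_equal_select_path : Prop := ∀ (path : List (List Int)), Dom_select_path path → Spec_select_path path (select_path path)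

-- ===== LEMMAS AND PROOFS =====

-- insertBy unfolded one step (definitional)
lemma insertBy_cons {α : Type} (bef : α → α → Bool) (x y : α) (ys : List α) :
    PySem.List.insertBy bef x (y :: ys)
      = if bef x y then x :: y :: ys else y :: PySem.List.insertBy bef x ys := rfl

-- insertBy (stable insertion step) commutes with filtering an equal-key class,
-- provided the accumulator is already sorted by key.
lemma filter_insertBy (x : List Int) (c : Int) :
    ∀ (acc : List (List Int)),
      acc.Pairwise (fun a b => PySem.List.len a ≤ PySem.List.len b) →
      (PySem.List.insertBy (fun a b => decide (PySem.List.len a < PySem.List.len b)) x acc).filter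
          (fun y => decide (PySem.List.len y = c))
        = acc.filter (fun y => decide (PySem.List.len y = c))
            ++ (if PySem.List.len x = c then [x] else []) := by
  intro acc
  induction acc with
  | nil =>
      intro _
      by_cases hxc : ((x.length : Int)) = c <;>
        simp [PySem.List.insertBy, hxc]
  | cons y ys ih =>
      intro hp
      rw [insertBy_cons]
      by_cases hlt : PySem.List.len x < PySem.List.len y
      · rw [if_pos (by simpa using hlt)]
        by_cases hxc : PySem.List.len x = c
        · -- every element of y :: ys has key > c, so its filter is empty
          have hemp : (y :: ys).filter (fun y => decide (PySem.List.len y = c)) = [] := by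
            rw [List.filter_eq_nil_iff]
            intro z hz
            simp only [decide_eq_true_eq]
            rcases List.mem_cons.mp hz with rfl | hz
            · simp only [PySem.List.len] at hxc hlt ⊢; omega
            · have := (List.pairwise_cons.mp hp).1 z hz
              simp only [PySem.List.len] at hxc hlt this ⊢; omega
          rw [List.filter_cons, hemp]
          simp only [PySem.List.len] at hxc
          simp [hxc]
        · rw [List.filter_cons, if_neg (by simpa using hxc)]
          simp only [PySem.List.len] at hxc
          simp [hxc]
      · rw [if_neg (by simpa using hlt)]
        have hys := (List.pairwise_cons.mp hp).2
        rw [List.filter_cons, List.filter_cons, ih hys]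
        split_ifs <;> simp

-- stability of PySem.List.sorted: filtering one key class gives the original order
lemma sorted_filter_stable (c : Int) :
    ∀ (xs : List (List Int)),
      (PySem.List.sorted xs (fun p => PySem.List.len p)).filter (fun y => decide (PySem.List.len y = c))
        = xs.filter (fun y => decide (PySem.List.len y = c)) := by
  intro xs
  induction xs using List.reverseRecOn with
  | nil => simp [PySem.List.sorted]
  | append_singleton xs x ih =>
      have hstep : PySem.List.sorted (xs ++ [x]) (fun p => PySem.List.len p)
          = PySem.List.insertBy (fun a b => decide (PySem.List.len a < PySem.List.len b)) x
              (PySem.List.sorted xs (fun p => PySem.List.len p)) := by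
        rw [PySem.List.sorted_eq_foldl_insertBy, PySem.List.sorted_eq_foldl_insertBy,
          List.foldl_append]
        rfl
      rw [hstep,
        filter_insertBy x c _ (PySem.List.sorted_pairwise xs (fun p => PySem.List.len p)), ih,
        List.filter_append]
      by_cases hxc : ((x.length : Int)) = c <;> simp [List.filter, hxc]

-- the B-side prefix loop on a length-sorted list with minimal m is the filter
lemma takeMinLen_eq_filter (m : Int) :
    ∀ (zs : List (List Int)),
      zs.Pairwise (fun a b => PySem.List.len a ≤ PySem.List.len b) →
      (∀ y ∈ zs, m ≤ PySem.List.len y) →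
      takeMinLen m zs = zs.filter (fun y => decide (PySem.List.len y = m)) := by
  intro zs
  induction zs with
  | nil => intro _ _; simp [takeMinLen]
  | cons z zs ih =>
      intro hp hm
      by_cases hz : PySem.List.len z = m
      · rw [takeMinLen]
        simp only [hz]
        have := ih (List.pairwise_cons.mp hp).2 (fun y hy => hm y (List.mem_cons_of_mem _ hy))
        simp only [PySem.List.len] at hz
        simp [List.filter, hz, this]
      · have hzgt : m < PySem.List.len z := by
          have := hm z (List.mem_cons_self)
          omega
        have hemp : (z :: zs).filter (fun y => decide (PySem.List.len y = m)) = [] := by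
          rw [List.filter_eq_nil_iff]
          intro y hy
          simp only [decide_eq_true_eq]
          rcases List.mem_cons.mp hy with rfl | hy'
          · exact hz
          · have h2 := (List.pairwise_cons.mp hp).1 y hy'
            simp only [PySem.List.len] at hzgt h2 ⊢
            omega
        rw [takeMinLen, hemp]
        simp only [PySem.List.len] at hz
        simp [hz]

-- A's function computes the filter by the minimum length
lemma select_path_eq_filter (path : List (List Int)) :
    select_path path
      = path.filter (fun p =>
          decide (PySem.List.len p
            = (PySem.List.min? (path.map PySem.List.len) (fun x => x)).getD 0)) := by
  unfold select_path
  have hcols : (PySem.List.pyRange 0 (PySem.List.len path)).foldl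
      (fun acc i => acc ++ [PySem.List.len (PySem.List.pyGetD path i [])]) []
      = path.map PySem.List.len := by
    rw [PySem.List.foldl_pyRange_pyGetD path [] (fun acc x => acc ++ [PySem.List.len x]) [] le_rfl,
      Int.toNat_zero, List.drop_zero, PySem.List.foldl_append_singleton_eq_map, List.nil_append]
  simp only [hcols]
  set m := (PySem.List.min? (path.map PySem.List.len) (fun x => x)).getD 0 with hm
  have hlen : PySem.List.len (path.map PySem.List.len) = PySem.List.len path := by
    simp [PySem.List.len]
  rw [hlen]
  have hcong : (PySem.List.pyRange 0 (PySem.List.len path)).foldl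
      (fun acc i => if PySem.List.pyGetD (path.map PySem.List.len) i 0 = m
        then acc ++ [PySem.List.pyGetD path i []] else acc) []
      = (PySem.List.pyRange 0 (PySem.List.len path)).foldl
      (fun acc i => (fun acc p => if PySem.List.len p = m then acc ++ [p] else acc) acc
        (PySem.List.pyGetD path i [])) [] := by
    apply PySem.List.foldl_congr_mem
    intro acc i hi
    have hi' := (PySem.List.mem_pyRange_one).mp hi
    have h0 : 0 ≤ i := hi'.1
    have h1 : i < PySem.List.len path := hi'.2
    have h1' : i.toNat < path.length := by
      simp [PySem.List.len] at h1; omega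
    have hmap : PySem.List.pyGetD (path.map PySem.List.len) i 0
        = PySem.List.len (PySem.List.pyGetD path i []) := by
      rw [PySem.List.pyGetD_eq_getElem _ _ h0 (by simp [PySem.List.len] at h1 ⊢; omega),
        PySem.List.pyGetD_eq_getElem _ _ h0 (by simp [PySem.List.len] at h1 ⊢; omega)]
      simp
    rw [hmap]
  rw [hcong,
    PySem.List.foldl_pyRange_pyGetD path [] (fun acc p => if PySem.List.len p = m then acc ++ [p] else acc) [] le_rfl]
  simp only [Int.toNat_zero, List.drop_zero]
  simpa using PySem.List.foldl_append_ite_eq_filter (fun p : List Int => PySem.List.len p = m) path []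

-- ===== VERDICT (by name: the statement is the Claim_ definition above) =====
theorem select_path_spec : Claim_equal_select_path := by
  intro path _
  unfold Spec_select_path
  by_cases hne : path = []
  · subst hne
    simp [select_path, select_path_alt, PySem.List.pyRange, PySem.List.len]
  · rw [select_path_eq_filter]
    unfold select_path_alt
    rw [if_neg hne]
    have hsne : PySem.List.sorted path (fun p => PySem.List.len p) ≠ [] := by
      intro h
      exact hne ((PySem.List.sorted_eq_nil_iff path (fun p => PySem.List.len p) false).mp h)
    obtain ⟨h, t, hht⟩ := List.exists_cons_of_ne_nil hsne
    have hhd : PySem.List.pyGetD (PySem.List.sorted path (fun p => PySem.List.len p)) 0 [] = h := by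
      rw [hht, PySem.List.pyGetD_zero_cons]
    have hmin : ∀ y ∈ path, PySem.List.len h ≤ PySem.List.len y :=
      PySem.List.key_head_sorted_le path (fun p => PySem.List.len p) hht
    have hhmem : h ∈ path := by
      have : h ∈ PySem.List.sorted path (fun p => PySem.List.len p) := by
        rw [hht]; exact List.mem_cons_self
      exact (PySem.List.mem_sorted _ _ _ _).mp this
    -- A's minimum value equals the length of the sorted head
    have hmA : (PySem.List.min? (path.map PySem.List.len) (fun x => x)).getD 0 = PySem.List.len h := by
      obtain ⟨v, hv⟩ : ∃ v, PySem.List.min? (path.map PySem.List.len) (fun x => x) = some v := by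
        cases hv : PySem.List.min? (path.map PySem.List.len) (fun x => x) with
        | none =>
            have := (PySem.List.min?_eq_none_iff (path.map PySem.List.len) (fun x => x)).mp hv
            simp [List.map_eq_nil_iff] at this
            exact absurd this hne
        | some v => exact ⟨v, rfl⟩
      have hvmem := PySem.List.min?_mem hv
      obtain ⟨p, hp, hpv⟩ := List.mem_map.mp hvmem
      have hle1 : PySem.List.len h ≤ v := hpv ▸ hmin p hp
      have hle2 : v ≤ PySem.List.len h :=
        PySem.List.min?_isMin hv _ (List.mem_map_of_mem hhmem)
      rw [hv]
      simpa using le_antisymm hle2 hle1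
    show _ = takeMinLen
        (PySem.List.len (PySem.List.pyGetD (PySem.List.sorted path (fun p => PySem.List.len p)) 0 []))
        (PySem.List.sorted path (fun p => PySem.List.len p))
    rw [hhd, hmA,
      takeMinLen_eq_filter (PySem.List.len h) _
        (PySem.List.sorted_pairwise path (fun p => PySem.List.len p))
        (fun y hy => hmin y ((PySem.List.mem_sorted _ _ _ _).mp hy)),
      sorted_filter_stable]
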